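-- pv_equiv track=rewrite | github.com/posit-dev/positron | extensions/positron-python/python_files/posit/positron/positron_lsp.py | _find_enclosing_paren
-- ===== SOURCE A (Python) =====
-- def _find_enclosing_paren(text: str) -> int:
--     """Find position of the opening parenthesis for the enclosing function call."""
--     depth = 0
--     for i in range(len(text) - 1, -1, -1):
--         c = text[i]
--         if c == ")":
--             depth += 1
--         elif c == "(":
--             if depth == 0:
--                 return i
--             depth -= 1
--     return -1
-- ===== SOURCE B (Python) =====
-- def _find_enclosing_paren(text: str) -> int:
--     """Find position of the opening parenthesis for the enclosing function call."""
--     stack = []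
--     for i, c in enumerate(text):
--         if c == "(":
--             stack.append(i)
--         elif c == ")":
--             if stack:
--                 stack.pop()
--     return stack[-1] if stack else -1
-- ===== Notes on version B (the rewrite author's own statement) =====
-- stated objective: alternative
-- what changed: Replaces the backward scan with a depth counter by a forward scan maintaining a stack of the indices of currently-open parentheses, returning the stack top (or -1).
import Mathlib
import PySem

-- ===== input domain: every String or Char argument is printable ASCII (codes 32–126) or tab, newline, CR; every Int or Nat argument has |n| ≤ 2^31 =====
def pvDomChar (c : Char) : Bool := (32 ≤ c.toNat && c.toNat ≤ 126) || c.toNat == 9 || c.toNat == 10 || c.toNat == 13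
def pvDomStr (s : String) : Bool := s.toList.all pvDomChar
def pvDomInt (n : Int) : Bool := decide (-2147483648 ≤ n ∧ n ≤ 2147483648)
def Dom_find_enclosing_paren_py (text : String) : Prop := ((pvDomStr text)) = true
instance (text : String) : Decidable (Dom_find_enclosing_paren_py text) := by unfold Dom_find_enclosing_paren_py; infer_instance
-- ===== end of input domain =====

-- B replaces A's backward scan with a depth counter by a forward scan keeping a stack of
-- indices of currently-open parentheses; same O(n) cost, different traversal and state.

-- ===== PORT A =====
-- A iterates i = len-1 … 0; ported as structural recursion over the reversed character
-- list, carrying the current index i and the depth (exact step-for-step hand port: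
-- 'for i in range(len(text)-1,-1,-1)' visits exactly the reversed list with these indices).
def pvARev : List Char → Int → Int → Int
  | [], _, _ => -1
  | c :: rest, i, depth =>
    if c = ')' then pvARev rest (i - 1) (depth + 1)
    else if c = '(' then
      (if depth = 0 then i else pvARev rest (i - 1) (depth - 1))
    else pvARev rest (i - 1) depth

def find_enclosing_paren_py (text : String) : Int :=
  pvARev text.toList.reverse ((text.toList.length : Int) - 1) 0

-- ===== PORT B =====
-- stack of indices; Python appends/pops at the end and reads stack[-1]; the Lean stack
-- keeps the top at the front (cons = append, tail = pop-if-nonempty since [].tail = []).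
def pvBStep (st : List Int) (ic : Int × Char) : List Int :=
  if ic.2 = '(' then ic.1 :: st
  else if ic.2 = ')' then st.tail
  else st

def find_enclosing_paren_py_alt (text : String) : Int :=
  match (PySem.List.enumerate text.toList).foldl pvBStep [] with
  | [] => -1
  | i :: _ => i

-- ===== PRECONDITION & SPEC =====
def Spec_find_enclosing_paren_py (text : String) (out : Int) : Prop := out = find_enclosing_paren_py_alt text
instance (text : String) (out : Int) : Decidable (Spec_find_enclosing_paren_py text out) := by unfold Spec_find_enclosing_paren_py; infer_instance

-- ===== CLAIM (what is proved, stated in full; the proofs are below) =====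
def Claim_equal_find_enclosing_paren_py : Prop := ∀ (text : String), Dom_find_enclosing_paren_py text → Spec_find_enclosing_paren_py text (find_enclosing_paren_py text)

-- ===== LEMMAS AND PROOFS =====

def pvStack (cs : List Char) : List Int :=
  (PySem.List.enumerate cs).foldl pvBStep []

theorem pvStack_append (cs : List Char) (c : Char) :
    pvStack (cs ++ [c]) = pvBStep (pvStack cs) ((cs.length : Int), c) := by
  simp [pvStack, PySem.List.enumerate_append, List.foldl_append, PySem.List.enumerate]

theorem pvARev_stack (cs : List Char) (d : Nat) :
    pvARev cs.reverse ((cs.length : Int) - 1) (d : Int) =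
      (match (pvStack cs)[d]? with | some i => i | none => (-1 : Int)) := by
  induction cs using List.reverseRecOn generalizing d with
  | nil => simp [pvARev, pvStack, PySem.List.enumerate]
  | append_singleton cs c ih =>
    rw [pvStack_append]
    have hlen : ((cs ++ [c]).length : Int) - 1 = (cs.length : Int) := by
      simp
    rw [List.reverse_append]
    simp only [List.reverse_singleton, List.singleton_append, hlen]
    by_cases hc1 : c = ')'
    · -- depth + 1 ; stack tail
      have h1 : ((d : Int) + 1) = ((d + 1 : Nat) : Int) := by push_cast; ring
      simp only [pvARev, hc1, pvBStep, if_neg (by decide : ¬ (')' = '('))]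
      rw [show (cs.length : Int) - 1 = ((cs.length : Int) - 1) from rfl, h1, ih (d + 1)]
      simp [List.getElem?_tail]
    · by_cases hc2 : c = '('
      · subst hc2
        by_cases hd : d = 0
        · subst hd
          simp [pvARev, pvBStep]
        · obtain ⟨n, rfl⟩ : ∃ n, d = n + 1 := ⟨d - 1, by omega⟩
          have h1 : (((n + 1 : Nat) : Int) ≠ 0) := by push_cast; omega
          have h2 : (((n + 1 : Nat) : Int) - 1) = ((n : Nat) : Int) := by push_cast; ring
          simp only [pvARev, if_neg (by decide : ¬ ('(' = ')')), if_neg h1, pvBStep, h2]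
          rw [ih n]
          simp
      · simp only [pvARev, if_neg (by simpa using hc1), if_neg (by simpa using hc2),
          pvBStep]
        rw [ih d]

-- ===== VERDICT (by name: the statement is the Claim_ definition above) =====
theorem find_enclosing_paren_py_spec : Claim_equal_find_enclosing_paren_py := by
  intro text _
  unfold Spec_find_enclosing_paren_py find_enclosing_paren_py find_enclosing_paren_py_alt
  have := pvARev_stack text.toList 0
  rw [show ((0 : Nat) : Int) = 0 from rfl] at this
  rw [this]
  cases h : pvStack text.toList with
  | nil => simp [pvStack] at h; simp [h]
  | cons i st => simp [pvStack] at h; simp [h]
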